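-- pv_equiv track=rewrite | github.com/robfalck/OpenMDAO | openmdao/visualization/xdsm_viewer/xdsm_viewer.py | _find_connection_system
-- ===== SOURCE A (Python) =====
-- from typing import Sequence
--
-- def _find_connection_system(pathname: str, systems: Sequence[str]) -> str:
--     """
--     Find the pathname in the known list of systems.
--
--     If the pathname does not exist, try removing the part after and including the final '.'
--     and search again. If we did not recurse into certain groups, then this will effectively
--     treat the group as the source or target of a given connection.
--
--     Parameters
--     ----------
--     pathname
--         The pathname that is either the source or target of a connection.
--     systems
--         The systems we've added to the XDSM.
--
--     Raises
--     ------
--     ValueError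
--         If no compatible system is found.
--
--     Returns
--     -------
--     str
--         The pathname in the system that matches the given pathname.  This is either an identical string,
--         or the "most recent parent" system.
--     """
--     if pathname in systems.keys():
--         return pathname
--     elif '.' in pathname:
--         pathname, _, _ = pathname.rpartition('.')
--         return _find_connection_system(pathname, systems)
--     else:
--         raise ValueError(f'Could not find {pathname} in known systems.')
-- ===== SOURCE B (Python) =====
-- def _find_connection_system(pathname: str, systems) -> str:
--     # Enumerate every '.'-ancestor prefix up front (longest first) and return the
--     # first one that is a known system, instead of recursing with rpartition.
--     candidates = [pathname] + [pathname[:i] for i in range(len(pathname)) if pathname[i] == '.'][::-1]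
--     for cand in candidates:
--         if cand in systems.keys():
--             return cand
--     raise ValueError(f'Could not find {candidates[-1]} in known systems.')
-- ===== Notes on version B (the rewrite author's own statement) =====
-- stated objective: alternative
-- what changed: B enumerates every '.'-ancestor prefix of pathname up front (longest first) and returns the first one that is a key of systems, replacing A's repeated rpartition-and-recurse descent.
import Mathlib
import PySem

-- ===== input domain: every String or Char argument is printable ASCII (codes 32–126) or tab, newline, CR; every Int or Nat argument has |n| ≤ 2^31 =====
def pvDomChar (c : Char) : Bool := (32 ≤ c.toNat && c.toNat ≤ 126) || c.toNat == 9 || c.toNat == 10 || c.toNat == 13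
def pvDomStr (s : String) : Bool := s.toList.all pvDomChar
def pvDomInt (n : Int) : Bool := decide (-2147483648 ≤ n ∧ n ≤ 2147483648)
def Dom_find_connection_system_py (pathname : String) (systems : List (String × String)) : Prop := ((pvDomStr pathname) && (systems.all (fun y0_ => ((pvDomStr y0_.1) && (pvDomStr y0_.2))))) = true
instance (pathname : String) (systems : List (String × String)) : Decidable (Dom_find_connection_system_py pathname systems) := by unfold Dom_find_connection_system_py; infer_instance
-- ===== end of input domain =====

-- B replaces A's rpartition-recursion by enumerating all '.'-ancestor prefixes up
-- front (longest first) and returning the first known one; objective: alternative.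

-- ===== PORT A =====
-- pathname.rpartition('.')[0]: the characters before the LAST '.'; exact whenever
-- '.' ∈ cs, which is the only case A uses it in.
def pvRpartHead (cs : List Char) : List Char :=
  (((cs.reverse).dropWhile (fun c => !(c = '.' : Bool))).drop 1).reverse

-- termination lemma cited by the port's decreasing_by
lemma pvRpartHead_length_lt (cs : List Char) (h : '.' ∈ cs) :
    (pvRpartHead cs).length < cs.length := by
  have hr : '.' ∈ cs.reverse := by simpa using h
  have hne : cs.reverse.dropWhile (fun c => !(c = '.' : Bool)) ≠ [] := by
    intro hnil
    have := (List.dropWhile_eq_nil_iff).1 hnil '.' hr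
    simp at this
  have hlen : (cs.reverse.dropWhile (fun c => !(c = '.' : Bool))).length ≤ cs.length := by
    simpa using List.length_dropWhile_le (fun c => !(c = '.' : Bool)) cs.reverse
  have hpos : 0 < (cs.reverse.dropWhile (fun c => !(c = '.' : Bool))).length :=
    List.length_pos_iff.2 hne
  simp only [pvRpartHead, List.length_reverse, List.length_drop]
  omega

-- A's recursion, on char lists ('pathname in systems.keys()' = char-list equality
-- against the keys in order)
def pvFindA (cs : List Char) (keys : List (List Char)) : List Char :=
  if cs ∈ keys then cs
  else if h : '.' ∈ cs then pvFindA (pvRpartHead cs) keys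
  else cs  -- Python raises ValueError here; excluded by Pre_
termination_by cs.length
decreasing_by exact pvRpartHead_length_lt cs h

def find_connection_system_py (pathname : String) (systems : List (String × String)) : String :=
  String.mk (pvFindA pathname.toList (systems.map (fun kv => kv.1.toList)))

-- ===== PORT B =====
-- [pathname] + [pathname[:i] for i in range(len(pathname)) if pathname[i] == '.'][::-1]
def pvCands (cs : List Char) : List (List Char) :=
  cs :: (((List.range cs.length).filter (fun i => cs.getD i ' ' = '.')).map (fun i => cs.take i)).reverse

def find_connection_system_py_alt (pathname : String) (systems : List (String × String)) : String :=
  match (pvCands pathname.toList).find? (fun c => decide (c ∈ systems.map (fun kv => kv.1.toList))) with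
  | some c => String.mk c
  | none => String.mk ((pvCands pathname.toList).getLastD [])  -- Python raises ValueError here; excluded by Pre_

-- ===== PRECONDITION & SPEC =====
-- Pre_ excludes exactly the inputs on which A raises ValueError: those where no
-- '.'-ancestor prefix of pathname (the chars before some '.', or pathname itself)
-- is a key of systems.
def PreL (cs : List Char) (keys : List (List Char)) : Prop :=
  ∃ i ∈ List.range (cs.length + 1),
    (i = cs.length ∨ cs.getD i ' ' = '.') ∧ cs.take i ∈ keys

def Pre_find_connection_system_py (pathname : String) (systems : List (String × String)) : Prop :=
  PreL pathname.toList (systems.map (fun kv => kv.1.toList))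

instance (pathname : String) (systems : List (String × String)) : Decidable (Pre_find_connection_system_py pathname systems) := by
  unfold Pre_find_connection_system_py PreL; infer_instance

def pvWitness_find_connection_system_py : String × (List (String × String)) :=
  ("a.b", [("a", "x")])

def Spec_find_connection_system_py (pathname : String) (systems : List (String × String)) (out : String) : Prop := out = find_connection_system_py_alt pathname systems
instance (pathname : String) (systems : List (String × String)) (out : String) : Decidable (Spec_find_connection_system_py pathname systems out) := by unfold Spec_find_connection_system_py; infer_instance

-- ===== CLAIM (what is proved, stated in full; the proofs are below) =====
def Claim_equal_find_connection_system_py : Prop := ∀ (pathname : String) (systems : List (String × String)), Dom_find_connection_system_py pathname systems → Pre_find_connection_system_py pathname systems → Spec_find_connection_system_py pathname systems (find_connection_system_py pathname systems)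

-- ===== LEMMAS AND PROOFS =====

-- decomposition of a dotted string at its last '.'
lemma pvRpartHead_decomp (cs : List Char) (h : '.' ∈ cs) :
    ∃ t : List Char, cs = pvRpartHead cs ++ '.' :: t ∧ '.' ∉ t := by
  have hdr : '.' ∈ cs.reverse := by simpa using h
  have hne : cs.reverse.dropWhile (fun c => !(c = '.' : Bool)) ≠ [] := by
    intro hnil
    have := (List.dropWhile_eq_nil_iff).1 hnil '.' hdr
    simp at this
  obtain ⟨b, hb⟩ : ∃ b, cs.reverse.dropWhile (fun c => !(c = '.' : Bool)) = '.' :: b := by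
    have hhead := List.head_dropWhile_not (p := fun c => !(c = '.' : Bool)) (l := cs.reverse) hne
    cases hdw : cs.reverse.dropWhile (fun c => !(c = '.' : Bool)) with
    | nil => exact absurd hdw hne
    | cons x b =>
      refine ⟨b, ?_⟩
      have : x = '.' := by
        have := hhead
        simp [hdw] at this
        exact this
      rw [this]
  have hph : pvRpartHead cs = b.reverse := by simp [pvRpartHead, hb]
  refine ⟨(cs.reverse.takeWhile (fun c => !(c = '.' : Bool))).reverse, ?_, ?_⟩
  · have hsplit := List.takeWhile_append_dropWhile (p := fun c => !(c = '.' : Bool)) (l := cs.reverse)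
    have hcs : cs = (cs.reverse.takeWhile (fun c => !(c = '.' : Bool)) ++ ('.' :: b)).reverse := by
      rw [← hb, hsplit, List.reverse_reverse]
    rw [hph]
    conv_lhs => rw [hcs]
    simp
  · intro hmem
    have := List.mem_takeWhile_imp (List.mem_reverse.mp hmem)
    simp at this

-- B's candidate list of p ++ '.' :: t (t dot-free) is that string followed by p's candidates
lemma pvCands_decomp (p t : List Char) (ht : '.' ∉ t) :
    pvCands (p ++ '.' :: t) = (p ++ '.' :: t) :: pvCands p := by
  have hgetlow : ∀ i, i < p.length → (p ++ '.' :: t).getD i ' ' = p.getD i ' ' := by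
    intro i hi
    rw [List.getD_eq_getElem?_getD, List.getD_eq_getElem?_getD, List.getElem?_append_left hi]
  have hgetk : (p ++ '.' :: t).getD p.length ' ' = '.' := by
    rw [List.getD_eq_getElem?_getD, List.getElem?_append_right (le_refl p.length)]
    simp
  have hgethigh : ∀ j, j < t.length → (p ++ '.' :: t).getD (p.length + 1 + j) ' ' = t.getD j ' ' := by
    intro j hj
    rw [List.getD_eq_getElem?_getD, List.getD_eq_getElem?_getD,
      List.getElem?_append_right (by omega : p.length ≤ p.length + 1 + j),
      show p.length + 1 + j - p.length = j + 1 from by omega, List.getElem?_cons_succ]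
  have hQhigh : ∀ j, j < t.length → ¬ ((p ++ '.' :: t).getD (p.length + 1 + j) ' ' = '.') := by
    intro j hj heq
    rw [hgethigh j hj] at heq
    apply ht
    rw [List.getD_eq_getElem?_getD, List.getElem?_eq_getElem hj, Option.getD_some] at heq
    exact heq ▸ List.getElem_mem hj
  have hrange : List.range (p ++ '.' :: t).length =
      (List.range p.length ++ [p.length]) ++ (List.range t.length).map (fun j => p.length + 1 + j) := by
    rw [show (p ++ '.' :: t).length = (p.length + 1) + t.length from by simp; omega,
      List.range_add, List.range_succ]
  have hfilter : (List.range (p ++ '.' :: t).length).filter (fun i => (p ++ '.' :: t).getD i ' ' = '.') =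
      ((List.range p.length).filter (fun i => p.getD i ' ' = '.')) ++ [p.length] := by
    rw [hrange, List.filter_append, List.filter_append]
    have h1 : (List.range p.length).filter (fun i => (p ++ '.' :: t).getD i ' ' = '.') =
        (List.range p.length).filter (fun i => p.getD i ' ' = '.') := by
      apply List.filter_congr
      intro i hi
      rw [hgetlow i (List.mem_range.mp hi)]
    have h2 : [p.length].filter (fun i => (p ++ '.' :: t).getD i ' ' = '.') = [p.length] := by
      simp
    have h3 : ((List.range t.length).map (fun j => p.length + 1 + j)).filter
        (fun i => (p ++ '.' :: t).getD i ' ' = '.') = [] := by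
      rw [List.filter_map]
      refine List.map_eq_nil_iff.mpr ?_
      rw [List.filter_eq_nil_iff]
      intro j hj
      simp only [List.mem_range] at hj
      simpa using hQhigh j hj
    rw [h1, h2, h3, List.append_nil]
  have hmap : (((List.range p.length).filter (fun i => p.getD i ' ' = '.')) ++ [p.length]).map
        (fun i => (p ++ '.' :: t).take i) =
      (((List.range p.length).filter (fun i => p.getD i ' ' = '.')).map (fun i => p.take i)) ++ [p] := by
    rw [List.map_append]
    congr 1
    · apply List.map_congr_left
      intro i hi
      have hik : i < p.length := List.mem_range.mp (List.mem_of_mem_filter hi)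
      rw [List.take_append_of_le_length (by omega : i ≤ p.length)]
    · simp
  simp only [pvCands, hfilter, hmap, List.reverse_append, List.reverse_singleton]
  rfl

-- PreL transfers to the stripped prefix when cs itself is not a key
lemma PreL_strip (cs : List Char) (keys : List (List Char)) (t : List Char)
    (hcs : cs = pvRpartHead cs ++ '.' :: t) (ht : '.' ∉ t)
    (hpre : PreL cs keys) (hnk : cs ∉ keys) : PreL (pvRpartHead cs) keys := by
  obtain ⟨i, hir, hcond, hkey⟩ := hpre
  have hin : i < cs.length + 1 := List.mem_range.mp hir
  have hlt : i < cs.length := by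
    rcases Nat.lt_or_ge i cs.length with h | h
    · exact h
    · have : i = cs.length := by omega
      rw [this, List.take_length] at hkey
      exact absurd hkey hnk
  have hdot : cs.getD i ' ' = '.' := by
    rcases hcond with h | h
    · omega
    · exact h
  set k := (pvRpartHead cs).length with hk
  have hklen : cs.length = k + 1 + t.length := by rw [hcs]; simp; omega
  rcases Nat.lt_trichotomy i k with hik | hik | hik
  · -- i < k : witness i for the prefix
    refine ⟨i, List.mem_range.mpr (by omega), Or.inr ?_, ?_⟩
    · rw [hcs, List.getD_eq_getElem?_getD, List.getElem?_append_left hik] at hdot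
      rw [List.getD_eq_getElem?_getD]
      exact hdot
    · rw [hcs, List.take_append_of_le_length (by omega : i ≤ (pvRpartHead cs).length)] at hkey
      exact hkey
  · -- i = k : the prefix itself is a key
    refine ⟨k, List.mem_range.mpr (by omega), Or.inl rfl, ?_⟩
    rw [hik, hcs, List.take_left] at hkey
    rw [List.take_length]
    exact hkey
  · -- k < i < cs.length : the witness dot would lie inside the dot-free tail t
    exfalso
    have : cs.getD i ' ' = t.getD (i - k - 1) ' ' := by
      rw [hcs, List.getD_eq_getElem?_getD, List.getD_eq_getElem?_getD,
        List.getElem?_append_right (by omega : (pvRpartHead cs).length ≤ i),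
        show i - (pvRpartHead cs).length = (i - k - 1) + 1 from by omega, List.getElem?_cons_succ]
      simp
    rw [this] at hdot
    apply ht
    have hjl : i - k - 1 < t.length := by omega
    rw [List.getD_eq_getElem?_getD, List.getElem?_eq_getElem hjl, Option.getD_some] at hdot
    exact hdot ▸ List.getElem_mem hjl

-- main invariant: under PreL, B's scan finds exactly A's recursive answer
lemma pvFindA_eq_find? : ∀ n (cs : List Char), cs.length = n → ∀ keys : List (List Char),
    PreL cs keys →
    (pvCands cs).find? (fun c => decide (c ∈ keys)) = some (pvFindA cs keys) := by
  intro n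
  induction n using Nat.strong_induction_on with
  | _ n IH =>
    intro cs hlen keys hpre
    by_cases hmem : cs ∈ keys
    · rw [pvFindA, if_pos hmem, pvCands, List.find?_cons_of_pos (by simpa using hmem)]
    · by_cases hdot : '.' ∈ cs
      · obtain ⟨t, hcs, ht⟩ := pvRpartHead_decomp cs hdot
        have hpre' := PreL_strip cs keys t hcs ht hpre hmem
        have hlt := pvRpartHead_length_lt cs hdot
        have hIH := IH (pvRpartHead cs).length (by omega) (pvRpartHead cs) rfl keys hpre'
        rw [pvFindA, if_neg hmem, dif_pos hdot]
        have hcands : pvCands cs = cs :: pvCands (pvRpartHead cs) := by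
          conv_lhs => rw [hcs]
          rw [pvCands_decomp _ _ ht, ← hcs]
        rw [hcands, List.find?_cons_of_neg (by simpa using hmem), hIH]
      · -- PreL forces cs ∈ keys here: contradiction
        exfalso
        obtain ⟨i, hir, hcond, hkey⟩ := hpre
        have hin : i < cs.length + 1 := List.mem_range.mp hir
        rcases hcond with h | h
        · rw [h, List.take_length] at hkey; exact hmem hkey
        · rcases Nat.lt_or_ge i cs.length with hi | hi
          · apply hdot
            rw [List.getD_eq_getElem?_getD, List.getElem?_eq_getElem hi, Option.getD_some] at h
            exact h ▸ List.getElem_mem hi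
          · have : i = cs.length := by omega
            rw [this, List.getD_eq_getElem?_getD, List.getElem?_eq_none (le_refl _), Option.getD_none] at h
            simp at h

-- ===== VERDICT (by name: the statement is the Claim_ definition above) =====
theorem find_connection_system_py_spec : Claim_equal_find_connection_system_py := by
  intro pathname systems _ hpre
  unfold Spec_find_connection_system_py find_connection_system_py find_connection_system_py_alt
  rw [pvFindA_eq_find? pathname.toList.length pathname.toList rfl _ hpre]
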